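-- pv_equiv track=rewrite | github.com/kna163/partitions | src/partitions/parti.py | seq_to_part
-- ===== SOURCE A (Python) =====
-- Seq = list[int]
--
-- Part = list[int]
--
-- def seq_to_part(seq : Seq) -> Part:
--     #string of the form (0)101111010(1)
--     cur = 0
--     ans = []
--     for b in seq:
--         if b == 1:
--             cur += 1
--         else:
--             if cur != 0:
--                 ans.append(cur)
--     ans.reverse()
--     return ans
-- ===== SOURCE B (Python) =====
-- def seq_to_part(seq):
--     # pass 1: prefix table of cumulative counts of ones
--     cum = []
--     c = 0
--     for b in seq:
--         if b == 1:
--             c += 1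
--         cum.append(c)
--     # pass 2: select the recorded counts, then reverse
--     picks = [c for b, c in zip(seq, cum) if b != 1 and c != 0]
--     return list(reversed(picks))
-- ===== Notes on version B (the rewrite author's own statement) =====
-- stated objective: alternative
-- what changed: Replaces A's fused accumulate-and-record loop with a prefix-count table built first and a separate zip-based selection pass, reversed at the end.
import Mathlib
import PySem

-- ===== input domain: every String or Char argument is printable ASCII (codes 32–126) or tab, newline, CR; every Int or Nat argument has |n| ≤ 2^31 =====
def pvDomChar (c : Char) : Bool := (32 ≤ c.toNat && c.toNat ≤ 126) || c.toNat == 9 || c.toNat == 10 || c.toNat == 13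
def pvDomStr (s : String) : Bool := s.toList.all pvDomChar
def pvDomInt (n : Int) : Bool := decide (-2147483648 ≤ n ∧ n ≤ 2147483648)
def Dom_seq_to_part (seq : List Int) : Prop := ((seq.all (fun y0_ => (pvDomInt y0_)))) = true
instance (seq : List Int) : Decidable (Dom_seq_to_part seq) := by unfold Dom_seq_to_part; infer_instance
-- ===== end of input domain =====

-- B builds a prefix table of one-counts, then selects via a reversed zip pass: same values, different decomposition.

-- ===== PORT A =====
def seq_to_part (seq : List Int) : List Int :=
  let st := seq.foldl (fun (s : Int × List Int) b =>
      if b == 1 then (s.1 + 1, s.2)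
      else if s.1 ≠ 0 then (s.1, s.2 ++ [s.1]) else s)
    ((0 : Int), ([] : List Int))
  st.2.reverse

-- ===== PORT B =====
-- pass 1 of Source B: the prefix table of cumulative counts of ones
def pvCum (c : Int) : List Int → List Int
  | [] => []
  | b :: bs => let c' := if b == 1 then c + 1 else c; c' :: pvCum c' bs

def seq_to_part_alt (seq : List Int) : List Int :=
  let cum := pvCum 0 seq
  let picks := (seq.zip cum).filterMap
    (fun bc => if bc.1 ≠ 1 ∧ bc.2 ≠ 0 then some bc.2 else none)
  picks.reverse

-- ===== PRECONDITION & SPEC =====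
def Spec_seq_to_part (seq : List Int) (out : List Int) : Prop := out = seq_to_part_alt seq
instance (seq : List Int) (out : List Int) : Decidable (Spec_seq_to_part seq out) := by unfold Spec_seq_to_part; infer_instance

-- ===== CLAIM (what is proved, stated in full; the proofs are below) =====
def Claim_equal_seq_to_part : Prop := ∀ (seq : List Int), Dom_seq_to_part seq → Spec_seq_to_part seq (seq_to_part seq)

-- ===== LEMMAS AND PROOFS =====
theorem seq_to_part_fold_eq (seq : List Int) : ∀ (c : Int) (ans : List Int),
    (seq.foldl (fun (s : Int × List Int) b =>
      if b == 1 then (s.1 + 1, s.2)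
      else if s.1 ≠ 0 then (s.1, s.2 ++ [s.1]) else s) (c, ans)).2
    = ans ++ (seq.zip (pvCum c seq)).filterMap
        (fun bc => if bc.1 ≠ 1 ∧ bc.2 ≠ 0 then some bc.2 else none) := by
  induction seq with
  | nil => intro c ans; simp
  | cons b bs ih =>
    intro c ans
    rw [List.foldl_cons]
    by_cases hb : b = 1
    · have hstep : (if b == 1 then ((c, ans).1 + 1, (c, ans).2)
          else if (c, ans).1 ≠ 0 then ((c, ans).1, (c, ans).2 ++ [(c, ans).1]) else (c, ans)) = (c + 1, ans) := by
        simp [hb]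
      rw [hstep, ih (c + 1) ans]
      simp [pvCum, hb]
    · by_cases hc : c = 0
      · have hstep : (if b == 1 then ((c, ans).1 + 1, (c, ans).2)
          else if (c, ans).1 ≠ 0 then ((c, ans).1, (c, ans).2 ++ [(c, ans).1]) else (c, ans)) = (c, ans) := by
          simp [hb, hc]
        rw [hstep, ih c ans]
        simp [pvCum, hb, hc]
      · have hstep : (if b == 1 then ((c, ans).1 + 1, (c, ans).2)
          else if (c, ans).1 ≠ 0 then ((c, ans).1, (c, ans).2 ++ [(c, ans).1]) else (c, ans)) = (c, ans ++ [c]) := by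
          simp [hb, hc]
        rw [hstep, ih c (ans ++ [c])]
        simp [pvCum, hb, hc]

-- ===== VERDICT (by name: the statement is the Claim_ definition above) =====
theorem seq_to_part_spec : Claim_equal_seq_to_part := by
  intro seq _
  unfold Spec_seq_to_part seq_to_part seq_to_part_alt
  simp only []
  rw [seq_to_part_fold_eq seq 0 []]
  simp
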